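-- pv_equiv track=rewrite | github.com/connordoman/cosc320project | milestone3/first_algorithm.py | replace_with_new_word
-- ===== SOURCE A (Python) =====
-- REPLACEMENT_DICTIONARY = {
--     "the": "THE",
-- }
--
-- def replace_with_new_word(text):
--     text = text.strip()
--
--     # splitting the words in T
--     text_array = []
--     buffer_word = ""
--     for char in text:
--
--         if char == " ":
--             text_array.append(buffer_word)
--             buffer_word = ""
--         else:
--             buffer_word += char
--     text_array.append(buffer_word)
--
--     # replacing the words in T
--     for old_word, replacement in REPLACEMENT_DICTIONARY.items():
--         for word in text_array:
--             if word == old_word: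
--                 text_array[text_array.index(word)] = replacement
--
--     # rebuilding the string
--     text = ""
--     for word in text_array:
--         text += word + " "
--
--     return text
-- ===== SOURCE B (Python) =====
-- REPLACEMENT_DICTIONARY = {
--     "the": "THE",
-- }
--
-- def replace_with_new_word(text):
--     return "".join(REPLACEMENT_DICTIONARY.get(w, w) + " "
--                    for w in text.strip().split(" "))
-- ===== Notes on version B (the rewrite author's own statement) =====
-- stated objective: simpler
-- what changed: A's three phases (char-by-char split into a list, a nested dict-items scan that mutates the list via repeated list.index, and a rebuild loop with string +=) are replaced by one join over split with a direct dict lookup per word.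
import Mathlib
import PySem

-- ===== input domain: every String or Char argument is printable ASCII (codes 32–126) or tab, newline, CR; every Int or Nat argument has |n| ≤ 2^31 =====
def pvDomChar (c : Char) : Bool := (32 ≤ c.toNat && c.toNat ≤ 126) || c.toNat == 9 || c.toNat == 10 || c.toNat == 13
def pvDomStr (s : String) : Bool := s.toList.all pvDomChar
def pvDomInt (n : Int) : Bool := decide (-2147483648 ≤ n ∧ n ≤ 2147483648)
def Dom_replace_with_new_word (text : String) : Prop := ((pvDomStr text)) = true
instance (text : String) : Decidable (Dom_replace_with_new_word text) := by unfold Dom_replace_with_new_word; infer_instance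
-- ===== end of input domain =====

-- B replaces A's three phases (manual char split, nested dict scan mutating via list.index, rebuild loop)
-- by a single join over split(" ") with a direct dict lookup: simpler, same exact output.


-- ===== PORT A =====
-- the module constant REPLACEMENT_DICTIONARY (words as List Char)
def REPLACEMENT_DICTIONARY : PySem.Dict (List Char) (List Char) :=
  PySem.Dict.ofList [("the".toList, "THE".toList)]

-- A's splitting loop: state = (text_array, buffer_word)
def pvSplitStep (st : List (List Char) × List Char) (c : Char) :
    List (List Char) × List Char :=
  if c = ' ' then (st.1 ++ [st.2], []) else (st.1, st.2 ++ [c])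

-- A's inner replacing loop: 'for word in text_array: if word == old: text_array[text_array.index(word)] = rep'
-- (iteration by position over the list being mutated)
def pvReplLoop (old rep : List Char) (arr : List (List Char)) (i : Nat) :
    List (List Char) :=
  if h : i < arr.length then
    pvReplLoop old rep
      (if arr[i] = old then
        match PySem.List.index? arr arr[i] with
        | some j => arr.set j rep
        | none => arr
      else arr) (i + 1)
  else arr
termination_by arr.length - i
decreasing_by
  split
  · split
    · simp only [List.length_set]; omega
    · omega
  · omega

def replace_with_new_word (text : String) : String :=
  let cs := (PySem.Str.strip text).toList
  let st := cs.foldl pvSplitStep ([], [])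
  let arr1 := st.1 ++ [st.2]
  let arr2 := REPLACEMENT_DICTIONARY.items.foldl (fun a p => pvReplLoop p.1 p.2 a 0) arr1
  String.ofList (arr2.foldl (fun acc w => acc ++ w ++ [' ']) [])

-- ===== PORT B =====
def replace_with_new_word_alt (text : String) : String :=
  String.ofList (PySem.Chars.join []
    ((PySem.Chars.splitOn (PySem.Str.strip text).toList [' ']).map
      (fun w => REPLACEMENT_DICTIONARY.getD w w ++ [' '])))

-- ===== PRECONDITION & SPEC =====
def Spec_replace_with_new_word (text : String) (out : String) : Prop := out = replace_with_new_word_alt text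
instance (text : String) (out : String) : Decidable (Spec_replace_with_new_word text out) := by unfold Spec_replace_with_new_word; infer_instance

-- ===== CLAIM (what is proved, stated in full; the proofs are below) =====
def Claim_equal_replace_with_new_word : Prop := ∀ (text : String), Dom_replace_with_new_word text → Spec_replace_with_new_word text (replace_with_new_word text)

-- ===== LEMMAS AND PROOFS =====

-- reference split on a single separator character
def pvSplit (c : Char) : List Char → List (List Char)
  | [] => [[]]
  | d :: rest =>
    if d = c then [] :: pvSplit c rest
    else (pvSplit c rest).modifyHead (d :: ·)

theorem pv_go_eq (c : Char) (fuel : Nat) :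
    ∀ (l cur : List Char) (acc : List (List Char)), l.length ≤ fuel →
      PySem.Chars.splitOn.go [c] fuel l cur acc =
        acc.reverse ++ (pvSplit c l).modifyHead (cur.reverse ++ ·) := by
  induction fuel with
  | zero =>
    intro l cur acc h
    match l with
    | [] => simp [PySem.Chars.splitOn.go, pvSplit]
    | d :: rest => simp at h
  | succ fuel ih =>
    intro l cur acc h
    match l with
    | [] => simp [PySem.Chars.splitOn.go, pvSplit]
    | d :: rest =>
      rw [PySem.Chars.splitOn.go]
      have hlen : rest.length ≤ fuel := by simp at h; omega
      by_cases hd : d = c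
      · subst hd
        have hpre : [d].isPrefixOf (d :: rest) = true := by
          simp
        rw [hpre]
        have hdrop : List.drop ([d].length) (d :: rest) = rest := by simp
        simp only [if_true, hdrop]
        rw [ih rest [] (cur.reverse :: acc) hlen]
        simp only [pvSplit]
        simp
        cases pvSplit d rest <;> simp
      · have hpre : [c].isPrefixOf (d :: rest) = false := by
          simp only [List.isPrefixOf_cons₂, List.isPrefixOf_nil_left, Bool.and_true,
            beq_eq_false_iff_ne, ne_eq]
          intro hh; exact hd hh.symm
        rw [hpre]
        simp only [Bool.false_eq_true, if_false]
        rw [ih rest (d :: cur) acc hlen]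
        simp only [pvSplit, if_neg hd, List.modifyHead_modifyHead]
        congr 1
        cases pvSplit c rest <;> simp

theorem pvSplitOn_eq (c : Char) (s : List Char) :
    PySem.Chars.splitOn s [c] = pvSplit c s := by
  rw [PySem.Chars.splitOn, pv_go_eq c (s.length + 1) s [] [] (by omega)]
  cases pvSplit c s <;> simp

-- A's splitting fold computes pvSplit
theorem pvSplitFold_spec (cs : List Char) :
    ∀ (arr : List (List Char)) (buf : List Char),
      (cs.foldl pvSplitStep (arr, buf)).1 ++ [(cs.foldl pvSplitStep (arr, buf)).2] =
        arr ++ (pvSplit ' ' cs).modifyHead (buf ++ ·) := by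
  induction cs with
  | nil => intro arr buf; simp [pvSplit]
  | cons d rest ih =>
    intro arr buf
    by_cases hd : d = ' '
    · subst hd
      simp only [List.foldl_cons, pvSplitStep, if_true]
      rw [ih (arr ++ [buf]) []]
      simp only [pvSplit]
      simp
      cases pvSplit ' ' rest <;> simp
    · simp only [List.foldl_cons, pvSplitStep, if_neg hd]
      rw [ih arr (buf ++ [d])]
      simp only [pvSplit, if_neg hd, List.modifyHead_modifyHead]
      congr 1
      cases pvSplit ' ' rest <;> simp

-- the per-word substitution A's replace phase performs
def pvSubst (old rep w : List Char) : List Char := if w = old then rep else w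

theorem pv_take_set (arr : List (List Char)) (i : Nat) (hi : i < arr.length) (rep : List Char) :
    (arr.set i rep).take (i+1) = arr.take i ++ [rep] := by
  apply List.ext_getElem
  · simp; omega
  · intro k h1 h2
    simp only [List.getElem_take, List.getElem_set]
    rcases Nat.lt_or_ge k i with h | h
    · rw [if_neg (by omega), List.getElem_append_left (by simp; omega)]
      simp [List.getElem_take]
    · have hk : k = i := by simp at h1; omega
      subst hk
      rw [if_pos rfl, List.getElem_append_right (by simp)]
      simp

theorem pvReplLoop_spec (old rep : List Char) (hne : old ≠ rep) :
    ∀ (n : Nat) (arr : List (List Char)) (i : Nat), arr.length - i = n →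
      (∀ j (hj : j < arr.length), j < i → arr[j] ≠ old) →
      pvReplLoop old rep arr i = arr.take i ++ (arr.drop i).map (pvSubst old rep) := by
  intro n
  induction n with
  | zero =>
    intro arr i hlen hpre
    rw [pvReplLoop]
    have hni : ¬ i < arr.length := by omega
    have hge : arr.length ≤ i := by omega
    simp [hni, List.drop_eq_nil_of_le hge, List.take_of_length_le hge]
  | succ n ih =>
    intro arr i hlen hpre
    rw [pvReplLoop]
    have hi : i < arr.length := by omega
    simp only [dif_pos hi]
    by_cases hw : arr[i] = old
    · rw [if_pos hw]
      have hidx : PySem.List.index? arr old = some i := by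
        rw [← hw]
        rw [PySem.List.index?_eq_some_iff]
        refine ⟨arr.take i, arr.drop (i+1), ?_, by simp [hi.le], ?_⟩
        · rw [hw]
          conv_lhs => rw [← List.take_append_drop i arr]
          congr 1
          rw [List.drop_eq_getElem_cons hi, hw]
        · intro hmem
          obtain ⟨j, hj, hje⟩ := List.mem_iff_getElem.mp hmem
          have hj2 : j < i ∧ j < arr.length := by simpa using hj
          rw [List.getElem_take] at hje
          exact hpre j hj2.2 hj2.1 (by rw [hje, hw])
      rw [hw, hidx]
      show pvReplLoop old rep (arr.set i rep) (i + 1) = _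
      have harr' : (arr.set i rep).length - (i+1) = n := by simp; omega
      rw [ih (arr.set i rep) (i+1) harr' ?_]
      · have hdrop : (arr.set i rep).drop (i+1) = arr.drop (i+1) := by
          apply List.ext_getElem <;> simp [List.getElem_set]
          intro k h1 h2; omega
        have htake : (arr.set i rep).take (i+1) = arr.take i ++ [rep] :=
          pv_take_set arr i hi rep
        rw [hdrop, htake]
        rw [List.drop_eq_getElem_cons hi]
        simp [pvSubst, hw]
      · intro j hj hji
        rw [List.getElem_set]
        split
        · exact fun h => hne h.symm
        · exact hpre j (by simpa using hj) (by omega)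
    · rw [if_neg hw]
      rw [ih arr (i+1) (by omega) ?_]
      · rw [List.drop_eq_getElem_cons hi]
        simp only [List.map_cons, pvSubst, if_neg hw]
        rw [List.take_add_one, List.getElem?_eq_getElem hi, Option.toList_some,
          List.append_assoc]
        rfl
      · intro j hj hji
        rcases Nat.lt_or_ge j i with h | h
        · exact hpre j hj h
        · have : j = i := by omega
          subst this; exact hw

-- getD on the one-entry dictionary
theorem pv_getD_dict (w : List Char) :
    REPLACEMENT_DICTIONARY.getD w w = pvSubst "the".toList "THE".toList w := by
  by_cases h : w = "the".toList
  · subst h; simp [pvSubst]; decide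
  · rw [pvSubst, if_neg h]
    have hd : REPLACEMENT_DICTIONARY =
        PySem.Dict.insert PySem.Dict.empty "the".toList "THE".toList := by decide
    rw [hd, PySem.Dict.getD_insert]
    simp [PySem.Dict.getD, PySem.Dict.get?, PySem.Dict.empty]
    intro hh
    apply absurd _ h
    rw [hh]; decide

-- join with empty separator is flatten
theorem pv_join_nil_eq_flatten (parts : List (List Char)) :
    PySem.Chars.join [] parts = parts.flatten := by
  induction parts with
  | nil => simp [PySem.Chars.join, List.intercalate]
  | cons p rest ih =>
    cases rest with
    | nil => simp [PySem.Chars.join, List.intercalate]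
    | cons q r =>
      rw [PySem.Chars.join_cons_cons] at *
      simp [ih]

-- ===== VERDICT (by name: the statement is the Claim_ definition above) =====
set_option maxHeartbeats 1000000 in
theorem replace_with_new_word_spec : Claim_equal_replace_with_new_word := by
  intro text _
  unfold Spec_replace_with_new_word replace_with_new_word replace_with_new_word_alt
  have hitems : REPLACEMENT_DICTIONARY.items = [("the".toList, "THE".toList)] := by decide
  simp only [hitems, List.foldl_cons, List.foldl_nil]
  set cs := (PySem.Str.strip text).toList with hcs
  rw [pvSplitOn_eq]
  have hsplit := pvSplitFold_spec cs [] []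
  simp only [List.nil_append] at hsplit
  have hmod : List.modifyHead (fun x => x) (pvSplit ' ' cs) = pvSplit ' ' cs := by
    cases pvSplit ' ' cs <;> simp
  rw [hmod] at hsplit
  rw [hsplit]
  have hne : ("the".toList : List Char) ≠ "THE".toList := by decide
  rw [pvReplLoop_spec "the".toList "THE".toList hne (pvSplit ' ' cs).length _ 0 (by simp)
      (by intro j hj h; omega)]
  simp only [List.take_zero, List.drop_zero, List.nil_append]
  rw [pv_join_nil_eq_flatten]
  have hfold : ∀ (l : List (List Char)) (acc : List Char),
      List.foldl (fun acc w => acc ++ w ++ [' ']) acc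
          (List.map (pvSubst "the".toList "THE".toList) l) =
        acc ++ (List.map (fun w => REPLACEMENT_DICTIONARY.getD w w ++ [' ']) l).flatten := by
    intro l
    induction l with
    | nil => intro acc; simp
    | cons x r ih =>
      intro acc
      simp only [List.map_cons, List.foldl_cons, List.flatten_cons, ih, pv_getD_dict]
      simp [List.append_assoc]
  rw [hfold]
  rfl
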